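-- pv_equiv track=rewrite | github.com/ericyangyu/WatersortSolver | game.py | __get_top_color_info
-- ===== SOURCE A (Python) =====
-- EMPTY_CONSTANT = ''
--
-- def __get_top_color_info(vial):
--     """
--     Gets the first top color and number of them
--
--     :param vial: list of colors
--     :return: a tuple (top color, num of top color)
--     """
--     top_color = EMPTY_CONSTANT
--     num_top_color = None
--     for i in range(len(vial)):
--         # skip empty slots
--         if vial[i] == EMPTY_CONSTANT:
--             continue
--
--         if top_color == EMPTY_CONSTANT:
--             # initilize top color
--             top_color = vial[i]
--             num_top_color = 1
--         else:
--             # early terminate if nonmatching color found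
--             if top_color != vial[i]:
--                 return top_color, num_top_color
--
--             # increment the number of top color found
--             num_top_color += 1
--
--     return top_color, 4 if not num_top_color else num_top_color
-- ===== SOURCE B (Python) =====
-- EMPTY_CONSTANT = ''
--
-- def __get_top_color_info(vial):
--     """Filter out empties, then the answer is the leading run of the filtered list."""
--     colors = [c for c in vial if c != EMPTY_CONSTANT]
--     if not colors:
--         return EMPTY_CONSTANT, 4
--     top = colors[0]
--     n = next((i for i, c in enumerate(colors) if c != top), len(colors))
--     return top, n
-- ===== Notes on version B (the rewrite author's own statement) =====
-- stated objective: idiomatic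
-- what changed: Replaces A's fused skip/initialize/early-return loop with stateful top_color/num_top_color accumulators by a filter of the non-empty colors followed by locating the first index differing from the head (the leading-run length).
import Mathlib
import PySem

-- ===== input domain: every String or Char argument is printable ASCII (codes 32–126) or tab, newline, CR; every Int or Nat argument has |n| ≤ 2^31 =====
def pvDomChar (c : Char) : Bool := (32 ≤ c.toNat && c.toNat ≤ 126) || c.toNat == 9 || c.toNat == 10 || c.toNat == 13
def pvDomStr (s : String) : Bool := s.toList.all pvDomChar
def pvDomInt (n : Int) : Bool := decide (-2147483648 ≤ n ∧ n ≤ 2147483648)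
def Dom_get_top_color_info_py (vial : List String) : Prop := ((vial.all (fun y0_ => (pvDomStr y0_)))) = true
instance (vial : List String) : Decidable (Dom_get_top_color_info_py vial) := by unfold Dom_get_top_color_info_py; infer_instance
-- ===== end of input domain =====

-- B replaces A's fused skip/count/early-return loop by filter-then-leading-run (idiomatic, same cost).
-- ===== PORT A =====
-- A's loop state: top_color, and num_top_color with 0 standing for Python's None
-- (num_top_color is never set to 0 by the loop, and Python's final 'not num_top_color'
-- is true exactly for None and 0, so the encoding is faithful).
def pvGoA : List String → String → Int → String × Int
  | [], top, num => (top, if num = 0 then 4 else num)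
  | x :: xs, top, num =>
    if x = "" then pvGoA xs top num
    else if top = "" then pvGoA xs x 1
    else if top ≠ x then (top, num)
    else pvGoA xs top (num + 1)

def get_top_color_info_py (vial : List String) : String × Int :=
  pvGoA vial "" 0

-- ===== PORT B =====
-- index of first element ≠ top, else length (Source B's next((i for i,c in enumerate …), len))
def pvFirstMismatch (top : String) : List String → Int
  | [] => 0
  | c :: cs => if c ≠ top then 0 else 1 + pvFirstMismatch top cs

def get_top_color_info_py_alt (vial : List String) : String × Int :=
  let colors := vial.filter (fun c => c ≠ "")
  match colors with
  | [] => ("", 4)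
  | top :: _ => (top, pvFirstMismatch top colors)

-- ===== PRECONDITION & SPEC =====
def Spec_get_top_color_info_py (vial : List String) (out : String × Int) : Prop := out = get_top_color_info_py_alt vial
instance (vial : List String) (out : String × Int) : Decidable (Spec_get_top_color_info_py vial out) := by unfold Spec_get_top_color_info_py; infer_instance

-- ===== CLAIM (what is proved, stated in full; the proofs are below) =====
def Claim_equal_get_top_color_info_py : Prop := ∀ (vial : List String), Dom_get_top_color_info_py vial → Spec_get_top_color_info_py vial (get_top_color_info_py vial)

-- ===== LEMMAS AND PROOFS =====

-- ===== VERDICT (by name: the statement is the Claim_ definition above) =====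
lemma pvGoA_run (xs : List String) : ∀ (top : String) (num : Int), top ≠ "" → 0 < num →
    pvGoA xs top num = (top, num + pvFirstMismatch top (xs.filter (fun c => c ≠ ""))) := by
  induction xs with
  | nil =>
    intro top num _ hn
    simp [pvGoA, pvFirstMismatch]
    omega
  | cons x xs ih =>
    intro top num ht hn
    by_cases hx : x = ""
    · simp [pvGoA, hx, ih top num ht hn]
    · by_cases he : top = x
      · subst he
        simp [pvGoA, hx, List.filter, pvFirstMismatch, ih top (num + 1) ht (by omega)]
        omega
      · simp [pvGoA, hx, ht, he, List.filter, pvFirstMismatch, Ne.symm he]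

lemma pvGoA_start (xs : List String) : pvGoA xs "" 0 = get_top_color_info_py_alt xs := by
  induction xs with
  | nil => simp [pvGoA, get_top_color_info_py_alt]
  | cons x xs ih =>
    by_cases hx : x = ""
    · simpa [pvGoA, hx, get_top_color_info_py_alt, List.filter] using ih
    · simp [pvGoA, hx, get_top_color_info_py_alt, List.filter,
        pvGoA_run xs x 1 hx (by omega), pvFirstMismatch]

theorem get_top_color_info_py_spec : Claim_equal_get_top_color_info_py := by
  intro vial _
  unfold Spec_get_top_color_info_py get_top_color_info_py
  exact pvGoA_start vial
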